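-- pv_equiv track=rewrite | github.com/sershlop/Sara | splitter.py | _extraer_tema_segmento
-- ===== SOURCE A (Python) =====
-- def _extraer_tema_segmento(segmento):
--     """
--     Extrae el tema principal de un segmento.
--     Similar a context._extraer_tema() pero independiente.
--
--     "que es la luna" → "luna"
--     "abre youtube"   → "youtube"
--     """
--     PALABRAS_VACIAS = {
--         "que", "como", "cuando", "donde", "quien", "cual",
--         "cuanto", "es", "son", "fue", "se", "de", "del",
--         "la", "el", "los", "las", "un", "una", "tiene",
--         "esta", "hace", "abre", "abrir", "dime", "explicame"
--     }
--
--     palabras   = segmento.split()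
--     candidatos = [
--         p for p in palabras
--         if p not in PALABRAS_VACIAS and len(p) > 2
--     ]
--
--     return candidatos[-1] if candidatos else None
-- ===== SOURCE B (Python) =====
-- def _extraer_tema_segmento(segmento):
--     PALABRAS_VACIAS = {
--         "que", "como", "cuando", "donde", "quien", "cual",
--         "cuanto", "es", "son", "fue", "se", "de", "del",
--         "la", "el", "los", "las", "un", "una", "tiene",
--         "esta", "hace", "abre", "abrir", "dime", "explicame"
--     }
--     # Single character-level pass: tokenize by hand while keeping the last
--     # accepted candidate in an accumulator; no word list is ever built.
--     tema = None
--     palabra = ""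
--     for ch in segmento:
--         if ch.isspace():
--             if palabra not in PALABRAS_VACIAS and len(palabra) > 2:
--                 tema = palabra
--             palabra = ""
--         else:
--             palabra += ch
--     if palabra not in PALABRAS_VACIAS and len(palabra) > 2:
--         tema = palabra
--     return tema
-- ===== Notes on version B (the rewrite author's own statement) =====
-- stated objective: alternative
-- what changed: B never calls split() or builds a word/candidate list: it tokenizes the string itself in one character-level pass, carrying the current word and the last accepted candidate as accumulators, whereas A splits into words, filters them into a list and indexes its last element.
import Mathlib
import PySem

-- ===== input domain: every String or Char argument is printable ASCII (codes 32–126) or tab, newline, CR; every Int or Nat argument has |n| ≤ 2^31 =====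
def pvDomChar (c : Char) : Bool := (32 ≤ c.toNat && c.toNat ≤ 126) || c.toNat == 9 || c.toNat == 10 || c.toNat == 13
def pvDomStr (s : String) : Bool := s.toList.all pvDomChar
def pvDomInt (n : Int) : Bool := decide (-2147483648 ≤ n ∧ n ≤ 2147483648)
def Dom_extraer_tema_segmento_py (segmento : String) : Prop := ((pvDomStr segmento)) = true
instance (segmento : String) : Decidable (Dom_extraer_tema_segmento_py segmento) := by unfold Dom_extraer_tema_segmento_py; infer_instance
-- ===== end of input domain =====

-- B replaces "split into words, filter, take the last candidate" by a single hand-written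
-- character-level scan that tokenizes on the fly and keeps the last accepted word in an
-- accumulator, never materialising the word list (objective: alternative).


-- ===== PORT A =====
def palabrasVacias : List String :=
  ["que", "como", "cuando", "donde", "quien", "cual",
   "cuanto", "es", "son", "fue", "se", "de", "del",
   "la", "el", "los", "las", "un", "una", "tiene",
   "esta", "hace", "abre", "abrir", "dime", "explicame"]

-- the comprehension's condition: p not in PALABRAS_VACIAS and len(p) > 2
def esCandidato (p : String) : Bool :=
  !(palabrasVacias.contains p) && decide (2 < PySem.Str.len p)

def extraer_tema_segmento_py (segmento : String) : Option String :=
  let palabras := PySem.Str.split₀ segmento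
  let candidatos := palabras.filter esCandidato
  if candidatos.isEmpty then none else PySem.List.pyGet? candidatos (-1)

-- ===== PORT B =====
-- B works on the characters directly; words are `List Char` (the PySem string model)
def palabrasVaciasC : List (List Char) := palabrasVacias.map String.toList

-- `palabra not in PALABRAS_VACIAS and len(palabra) > 2`
def esCandidatoC (w : List Char) : Bool :=
  !(palabrasVaciasC.contains w) && decide (2 < w.length)

-- the for-loop of Source B: state = (palabra, tema); after the loop, flush `palabra`
def scanUltima : List Char → List Char → Option (List Char) → Option (List Char)
  | [], palabra, tema => if esCandidatoC palabra then some palabra else tema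
  | c :: resto, palabra, tema =>
      if PySem.Chars.isspace c then
        scanUltima resto [] (if esCandidatoC palabra then some palabra else tema)
      else
        scanUltima resto (palabra ++ [c]) tema

def extraer_tema_segmento_py_alt (segmento : String) : Option String :=
  (scanUltima segmento.toList [] none).map String.ofList

-- ===== PRECONDITION & SPEC =====
def Spec_extraer_tema_segmento_py (segmento : String) (out : Option String) : Prop := out = extraer_tema_segmento_py_alt segmento
instance (segmento : String) (out : Option String) : Decidable (Spec_extraer_tema_segmento_py segmento out) := by unfold Spec_extraer_tema_segmento_py; infer_instance

-- ===== CLAIM (what is proved, stated in full; the proofs are below) =====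
def Claim_equal_extraer_tema_segmento_py : Prop := ∀ (segmento : String), Dom_extraer_tema_segmento_py segmento → Spec_extraer_tema_segmento_py segmento (extraer_tema_segmento_py segmento)

-- ===== LEMMAS AND PROOFS =====
-- split₀.go's accumulator just prepends the already-finished words
theorem go_acc (cs cur : List Char) (acc : List (List Char)) :
    PySem.Chars.split₀.go cs cur acc = acc.reverse ++ PySem.Chars.split₀.go cs cur [] := by
  induction cs generalizing cur acc with
  | nil => simp [PySem.Chars.split₀.go]; split <;> simp
  | cons c resto ih =>
    simp only [PySem.Chars.split₀.go]
    split
    · split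
      · exact ih [] acc
      · rw [ih [] (cur.reverse :: acc), ih [] [cur.reverse]]; simp
    · exact ih (c :: cur) acc

theorem esCandidatoC_nil : esCandidatoC [] = false := by decide

theorem lastOr_cons {α : Type} (a : α) (l : List α) (t : Option α) :
    ((a :: l).getLast?).or t = (l.getLast?).or (some a) := by
  cases h : l.getLast? <;> simp [List.getLast?_cons, h]

-- the scan computes "last filtered word of the remaining input, else the accumulator"
theorem scanUltima_eq (cs : List Char) (cur : List Char) (tema : Option (List Char)) :
    scanUltima cs cur tema
      = ((PySem.Chars.split₀.go cs cur.reverse []).filter esCandidatoC).getLast?.or tema := by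
  induction cs generalizing cur tema with
  | nil =>
    simp only [scanUltima, PySem.Chars.split₀.go]
    by_cases hcur : cur = []
    · subst hcur; simp [esCandidatoC_nil]
    · by_cases hc : esCandidatoC cur = true <;>
        simp [hc, hcur]
  | cons c resto ih =>
    simp only [scanUltima, PySem.Chars.split₀.go]
    by_cases hsp : PySem.Chars.isspace c = true
    · simp only [hsp, if_true]
      by_cases hcur : cur = []
      · subst hcur
        simp only [esCandidatoC_nil, Bool.false_eq_true, if_false, List.reverse_nil,
          List.isEmpty_nil, if_true]
        exact ih [] tema
      · rw [ih [] (if esCandidatoC cur then some cur else tema)]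
        conv_rhs => rw [if_neg (show ¬(cur.reverse.isEmpty = true) by simp [hcur])]
        rw [List.reverse_reverse, go_acc resto [] [cur]]
        simp only [List.reverse_singleton, List.singleton_append, List.reverse_nil]
        by_cases hc : esCandidatoC cur = true
        · simp [hc, lastOr_cons]
        · simp [hc]
    · simp only [hsp]
      rw [ih (cur ++ [c]) tema]
      simp
theorem extraer_eq (segmento : String) :
    extraer_tema_segmento_py segmento = extraer_tema_segmento_py_alt segmento := by
  have hB : extraer_tema_segmento_py_alt segmento
      = (((PySem.Chars.split₀ segmento.toList).filter esCandidatoC).getLast?).map String.ofList := by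
    unfold extraer_tema_segmento_py_alt
    rw [scanUltima_eq segmento.toList [] none]
    simp [PySem.Chars.split₀]
  have hbridge : ∀ w : List Char, esCandidato (String.ofList w) = esCandidatoC w := by
    intro w
    have hmem : (String.ofList w ∈ palabrasVacias) ↔ (w ∈ palabrasVaciasC) := by
      simp only [palabrasVaciasC, List.mem_map]
      constructor
      · intro h; exact ⟨_, h, String.toList_ofList (l := w)⟩
      · rintro ⟨s, hs, hw⟩
        have hsw : String.ofList w = s := String.ofList_eq.mpr hw.symm
        rwa [hsw]
    simp [esCandidato, esCandidatoC, hmem, PySem.Str.len_eq, String.toList_ofList]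
  unfold extraer_tema_segmento_py
  rw [hB]
  simp only [PySem.Str.split₀, List.filter_map, Function.comp_def, hbridge]
  cases h : ((PySem.Chars.split₀ segmento.toList).filter esCandidatoC) with
  | nil => simp
  | cons a l =>
    simp only [PySem.List.pyGet?_neg_one, List.isEmpty_map, List.isEmpty_cons,
      Bool.false_eq_true, if_false]
    exact (List.getLast?_map (f := String.ofList) (l := a :: l))

-- ===== VERDICT (by name: the statement is the Claim_ definition above) =====
theorem extraer_tema_segmento_py_spec : Claim_equal_extraer_tema_segmento_py := by
  intro segmento _
  exact extraer_eq segmento
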